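-- pv_equiv track=rewrite | github.com/MorrisLee000/Practice | Codesignal/listBeautifier.py | listBeautifier
-- ===== SOURCE A (Python) =====
-- def listBeautifier(a):
--     b = []
--     l = len(a)
--     if l == 0:
--         return b
--     else:
--         while a and a[0] != a[-1]:
--             a.pop(0)
--             a.pop(-1)
--         return a
-- ===== SOURCE B (Python) =====
-- def listBeautifier(a):
--     i, j = 0, len(a) - 1
--     while i < j and a[i] != a[j]:
--         i += 1
--         j -= 1
--     return a[i:j + 1]
-- ===== Notes on version B (the rewrite author's own statement) =====
-- stated objective: alternative
-- what changed: Replaced the destructive loop that pops from both ends of the list with two index pointers converging from the ends followed by a single slice; B does not mutate its argument.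
import Mathlib
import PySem

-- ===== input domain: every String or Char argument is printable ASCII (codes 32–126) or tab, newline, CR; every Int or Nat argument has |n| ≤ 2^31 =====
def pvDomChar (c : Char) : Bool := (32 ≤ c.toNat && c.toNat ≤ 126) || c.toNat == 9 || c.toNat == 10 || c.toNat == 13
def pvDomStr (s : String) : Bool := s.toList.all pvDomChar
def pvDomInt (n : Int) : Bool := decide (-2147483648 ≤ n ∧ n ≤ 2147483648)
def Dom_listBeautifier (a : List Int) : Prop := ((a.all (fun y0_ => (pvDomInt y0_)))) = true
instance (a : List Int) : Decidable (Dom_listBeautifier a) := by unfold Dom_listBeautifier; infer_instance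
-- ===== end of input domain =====

-- B replaces A's destructive pop-from-both-ends loop by two converging index pointers and one
-- final slice (objective: alternative). A mutates its argument in place (pops), B does not; the
-- equivalence proved here is about the RETURN value only.

-- ===== PORT A =====
-- the while loop: 'while a and a[0] != a[-1]: a.pop(0); a.pop(-1)', then return a
def aLoop (a : List Int) : List Int :=
  if h : a ≠ [] ∧ PySem.List.pyGetD a 0 0 ≠ PySem.List.pyGetD a (-1) 0 then
    aLoop (a.tail.dropLast)   -- pop(0) = tail, then pop(-1) = dropLast
  else a
termination_by a.length
decreasing_by
  have h1 : a.tail.length < a.length := by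
    cases a with
    | nil => exact absurd rfl h.1
    | cons x xs => simp
  have h2 : a.tail.dropLast.length ≤ a.tail.length := by
    simp [List.length_dropLast]
  omega

def listBeautifier (a : List Int) : List Int :=
  if a.length = 0 then [] else aLoop a

-- ===== PORT B =====
-- the while loop: 'while i < j and a[i] != a[j]: i += 1; j -= 1', returning the final (i, j)
def bGo (a : List Int) (i j : Int) : Int × Int :=
  if i < j ∧ PySem.List.pyGetD a i 0 ≠ PySem.List.pyGetD a j 0 then
    bGo a (i + 1) (j - 1)
  else (i, j)
termination_by (j - i).toNat
decreasing_by omega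

def listBeautifier_alt (a : List Int) : List Int :=
  let p := bGo a 0 ((a.length : Int) - 1)
  PySem.List.slice a (some p.1) (some (p.2 + 1))   -- a[i:j+1]

-- ===== PRECONDITION & SPEC =====
def Spec_listBeautifier (a : List Int) (out : List Int) : Prop := out = listBeautifier_alt a
instance (a : List Int) (out : List Int) : Decidable (Spec_listBeautifier a out) := by unfold Spec_listBeautifier; infer_instance

-- ===== CLAIM (what is proved, stated in full; the proofs are below) =====
def Claim_equal_listBeautifier : Prop := ∀ (a : List Int), Dom_listBeautifier a → Spec_listBeautifier a (listBeautifier a)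

-- ===== LEMMAS AND PROOFS =====

-- the slice a[i:j+1] (0 ≤ i ≤ j < |a|) is nonempty, with first element a[i] and last a[j]
lemma slice_first_last (a : List Int) (i j : Int) (hi : 0 ≤ i) (hij : i ≤ j)
    (hj : j < (a.length : Int)) :
    PySem.List.pyGetD (PySem.List.slice a (some i) (some (j + 1))) 0 0 = a[i.toNat]'(by omega) ∧
    PySem.List.pyGetD (PySem.List.slice a (some i) (some (j + 1))) (-1) 0 = a[j.toNat]'(by omega) ∧
    PySem.List.slice a (some i) (some (j + 1)) ≠ [] := by
  rw [PySem.List.slice_toNat a hi (by omega)]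
  have hjn : j.toNat < a.length := by omega
  have hlen : ((a.drop i.toNat).take ((j + 1).toNat - i.toNat)).length
      = (j + 1).toNat - i.toNat := by
    simp [List.length_take, List.length_drop]; omega
  have hne : (a.drop i.toNat).take ((j + 1).toNat - i.toNat) ≠ [] := by
    intro hnil; rw [hnil] at hlen; simp at hlen; omega
  refine ⟨?_, ?_, hne⟩
  · rw [PySem.List.pyGetD_zero, List.getD_eq_getElem _ _ (by rw [hlen]; omega)]
    simp [List.getElem_take, List.getElem_drop]
  · rw [PySem.List.pyGetD_neg_one _ _ hne, List.getLast_eq_getElem]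
    simp only [hlen, List.getElem_take, List.getElem_drop]
    congr 1
    omega

-- invariant: A's loop applied to the window a[i:j+1] computes B's final window
lemma aLoop_slice_bGo (k : Nat) : ∀ (a : List Int) (i j : Int), (j + 1 - i).toNat ≤ k →
    0 ≤ i → -1 ≤ j → j < (a.length : Int) →
    aLoop (PySem.List.slice a (some i) (some (j + 1))) =
      PySem.List.slice a (some (bGo a i j).1) (some ((bGo a i j).2 + 1)) := by
  induction k with
  | zero =>
    intro a i j hk hi hj1 hj2
    rw [bGo, if_neg (by omega)]
    rw [aLoop, dif_neg]
    intro hcon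
    apply hcon.1
    rw [PySem.List.slice_toNat a hi (by omega)]
    simp [List.take_eq_nil_iff]; omega
  | succ k ih =>
    intro a i j hk hi hj1 hj2
    rw [bGo]
    split_ifs with h
    · obtain ⟨hij, hne⟩ := h
      obtain ⟨hf, hl, hnil⟩ := slice_first_last a i j hi (by omega) hj2
      have hne' : a[i.toNat]'(by omega) ≠ a[j.toNat]'(by omega) := by
        rwa [PySem.List.pyGetD_eq_getElem a 0 hi (by omega),
             PySem.List.pyGetD_eq_getElem a 0 (by omega) (by omega)] at hne
      rw [aLoop, dif_pos ⟨hnil, by rw [hf, hl]; exact fun e => hne' e⟩]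
      have hstep : (PySem.List.slice a (some i) (some (j + 1))).tail.dropLast =
          PySem.List.slice a (some (i + 1)) (some ((j - 1) + 1)) := by
        rw [PySem.List.slice_toNat a hi (by omega),
            PySem.List.slice_toNat a (by omega : (0:Int) ≤ i + 1) (by omega)]
        rw [← List.drop_one, List.drop_take, List.drop_drop, List.dropLast_eq_take,
            List.take_take]
        have hlen : ((a.drop (i.toNat + 1)).take ((j + 1).toNat - i.toNat - 1)).length
            = (j + 1).toNat - i.toNat - 1 := by
          simp [List.length_take, List.length_drop]; omega
        rw [hlen]
        have e1 : i.toNat + 1 = (i + 1).toNat := by omega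
        have e2 : min ((j + 1).toNat - i.toNat - 1 - 1) ((j + 1).toNat - i.toNat - 1)
            = (j - 1 + 1).toNat - (i + 1).toNat := by omega
        rw [e1, e2]
      rw [hstep]
      exact ih a (i + 1) (j - 1) (by omega) (by omega) (by omega) (by omega)
    · by_cases hij : i ≤ j
      · obtain ⟨hf, hl, hnil⟩ := slice_first_last a i j hi hij hj2
        rw [aLoop, dif_neg]
        intro hcon
        apply hcon.2
        rw [hf, hl]
        rcases lt_or_eq_of_le hij with hlt | heq
        · have heqv : PySem.List.pyGetD a i 0 = PySem.List.pyGetD a j 0 := by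
            by_contra hc; exact h ⟨hlt, hc⟩
          rwa [PySem.List.pyGetD_eq_getElem a 0 hi (by omega),
               PySem.List.pyGetD_eq_getElem a 0 (by omega) (by omega)] at heqv
        · subst heq; rfl
      · rw [aLoop, dif_neg]
        intro hcon
        apply hcon.1
        rw [PySem.List.slice_toNat a hi (by omega)]
        simp [List.take_eq_nil_iff]; omega

-- ===== VERDICT (by name: the statement is the Claim_ definition above) =====
theorem listBeautifier_spec : Claim_equal_listBeautifier := by
  intro a _
  unfold Spec_listBeautifier listBeautifier listBeautifier_alt
  have h0 : PySem.List.slice a (some (0 : Int)) (some (((a.length : Int) - 1) + 1)) = a := by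
    rw [PySem.List.slice_toNat a le_rfl (by omega)]
    simp
  have hmain := aLoop_slice_bGo (a.length + 1) a 0 ((a.length : Int) - 1) (by omega) le_rfl
    (by omega) (by omega)
  rw [h0] at hmain
  split_ifs with hl
  · rw [← hmain]
    have ha : a = [] := List.length_eq_zero_iff.mp hl
    subst ha
    rw [aLoop, dif_neg (by simp)]
  · exact hmain
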